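-- pv_equiv track=rewrite | github.com/omkarkuppa/ptl_staging | Features/FirmwareGuard/CapsuleFeaturePkg/Tools/CapsuleCommon/Wrapper/FileWrapperLib.py | GetStrWithFixedWidth
-- ===== SOURCE A (Python) =====
-- from typing import Any, Dict, List, Tuple, Union
--
-- def GetStrWithFixedWidth (
--     Input     : List[str],
--     MaxWidth  : int,
--     PaddingPos: int = 0,
--     Sep       : str = '\n',
--     ) -> str:
--     """ Get the string with fixed width.
--
--     Args:
--         Input (List[str]):
--             Input string of list to be output as fixed width.
--         MaxWidth (int):
--             The maximum width value.
--         PaddingPos (int, optional):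
--             The padding offset to make each line with same
--             size of padding in the beginning.
--             Defaults to 0.
--         Sep (str, optional):
--             The separator symbol for the newline.
--             Defaults to '\n'.
--
--     Raises:
--         TypeError:
--             (1) Input is not list type.
--             (2) Maximum width is not int type.
--             (3) PaddingPos is not int type.
--             (4) Sep is not int type.
--             (5) Element of list is not str type.
--         ValueError:
--             (1) Maximum width should be positive value.
--             (2) Padding position should be positive value.
--
--     Returns:
--         str:
--             The string with fixed width and separator.
--     """
--     Result : str = str ()
--     CurrPos: int = PaddingPos
--     Padding: str = ' ' * (PaddingPos)
--
--     if not isinstance (Input, list):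
--         raise TypeError (f'The type should be list.')
--
--     if not isinstance (MaxWidth, int):
--         raise TypeError (f'Maximum width should be int.')
--     elif MaxWidth <= 0:
--         raise ValueError (f'Maximum width should be positive value.')
--
--     if not isinstance (PaddingPos, int):
--         raise TypeError (f'Padding position should be int.')
--     elif MaxWidth <= 0:
--         raise ValueError (f'Padding position should be positive value.')
--
--     if not isinstance (Sep, str):
--         raise TypeError (f'Separator should be string.')
--
--     for String in Input:
--         if not isinstance (String, str):
--             raise TypeError (f'Element of list should be string.')
--
--         if CurrPos + len (String) > MaxWidth:
--             Result += f'{Sep}{Padding}'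
--             CurrPos = PaddingPos
--
--         Result  += f' {String}'
--         CurrPos += len (String)
--
--     return Result
-- ===== SOURCE B (Python) =====
-- def _group(Input, MaxWidth, PaddingPos):
--     lines = []
--     curr = []
--     pos = PaddingPos
--     for s in Input:
--         if not isinstance(s, str):
--             raise TypeError('Element of list should be string.')
--         if pos + len(s) > MaxWidth:
--             lines.append(curr)
--             curr = []
--             pos = PaddingPos
--         curr.append(s)
--         pos += len(s)
--     lines.append(curr)
--     return lines
--
--
-- def GetStrWithFixedWidth(Input, MaxWidth, PaddingPos=0, Sep='\n'):
--     if not isinstance(Input, list):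
--         raise TypeError('The type should be list.')
--     if not isinstance(MaxWidth, int):
--         raise TypeError('Maximum width should be int.')
--     if MaxWidth <= 0:
--         raise ValueError('Maximum width should be positive value.')
--     if not isinstance(PaddingPos, int):
--         raise TypeError('Padding position should be int.')
--     if not isinstance(Sep, str):
--         raise TypeError('Separator should be string.')
--     joiner = Sep + ' ' * PaddingPos
--     return joiner.join(''.join(' ' + s for s in line)
--                        for line in _group(Input, MaxWidth, PaddingPos))
-- ===== Notes on version B (the rewrite author's own statement) =====
-- stated objective: alternative
-- what changed: B first partitions the input strings into lines with a small grouping helper and then renders the result in one pass of str.join (' '+s per string, lines joined by Sep+padding), instead of A's single loop that interleaves wrapping decisions with incremental string accumulation.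
import Mathlib
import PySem

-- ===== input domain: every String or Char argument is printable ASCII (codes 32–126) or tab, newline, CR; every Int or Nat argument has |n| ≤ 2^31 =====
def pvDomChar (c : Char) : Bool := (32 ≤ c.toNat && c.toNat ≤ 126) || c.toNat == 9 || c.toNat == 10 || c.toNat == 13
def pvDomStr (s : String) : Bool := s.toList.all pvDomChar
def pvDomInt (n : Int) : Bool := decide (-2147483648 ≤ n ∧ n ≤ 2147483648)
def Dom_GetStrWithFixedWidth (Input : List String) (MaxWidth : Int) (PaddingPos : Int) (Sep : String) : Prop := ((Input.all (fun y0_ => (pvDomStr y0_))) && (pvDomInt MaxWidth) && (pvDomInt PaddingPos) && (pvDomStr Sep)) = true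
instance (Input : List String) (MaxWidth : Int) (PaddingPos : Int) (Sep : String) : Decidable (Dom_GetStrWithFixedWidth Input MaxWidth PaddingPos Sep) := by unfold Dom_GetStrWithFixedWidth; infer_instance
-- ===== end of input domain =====

-- B groups the strings into lines first and renders them with one join; same value as A on
-- every input where A returns (MaxWidth > 0); objective: alternative decomposition.

-- ===== PORT A =====
-- A's for-loop as a structural recursion over Input with the same state (Result, CurrPos);
-- f'{Sep}{Padding}' is precomputed once as SepPad (A computes Padding once too).
def pvLoopA (MaxWidth PaddingPos : Int) (SepPad : List Char)
    : List String → List Char → Int → List Char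
  | [], r, _ => r
  | S :: rest, r, pos =>
      let cs := S.toList
      let st := if pos + (cs.length : Int) > MaxWidth then (r ++ SepPad, PaddingPos) else (r, pos)
      pvLoopA MaxWidth PaddingPos SepPad rest (st.1 ++ ' ' :: cs) (st.2 + (cs.length : Int))

def GetStrWithFixedWidth (Input : List String) (MaxWidth : Int) (PaddingPos : Int) (Sep : String) : String :=
  -- Padding = ' ' * PaddingPos (empty for PaddingPos ≤ 0, as in Python)
  String.ofList (pvLoopA MaxWidth PaddingPos (Sep.toList ++ List.replicate PaddingPos.toNat ' ')
    Input [] PaddingPos)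

-- ===== PORT B =====
-- Source B's _group: partition Input into lines, state (lines, curr, pos); the trailing
-- lines.append(curr) after the loop is the base case.
def pvGroup (MaxWidth PaddingPos : Int)
    : List String → List (List (List Char)) → List (List Char) → Int → List (List (List Char))
  | [], lines, curr, _ => lines ++ [curr]
  | S :: rest, lines, curr, pos =>
      let cs := S.toList
      let st := if pos + (cs.length : Int) > MaxWidth
                then (lines ++ [curr], ([] : List (List Char)), PaddingPos)
                else (lines, curr, pos)
      pvGroup MaxWidth PaddingPos rest st.1 (st.2.1 ++ [cs]) (st.2.2 + (cs.length : Int))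

-- ''.join(' ' + s for s in line)
def pvRenderLine (line : List (List Char)) : List Char := (line.map (fun cs => ' ' :: cs)).flatten

def GetStrWithFixedWidth_alt (Input : List String) (MaxWidth : Int) (PaddingPos : Int) (Sep : String) : String :=
  -- joiner = Sep + ' ' * PaddingPos
  String.ofList (PySem.Chars.join (Sep.toList ++ List.replicate PaddingPos.toNat ' ')
    ((pvGroup MaxWidth PaddingPos Input [] [] PaddingPos).map pvRenderLine))

-- ===== PRECONDITION & SPEC =====
-- Pre_ excludes exactly the inputs on which A raises: MaxWidth <= 0 raises ValueError.
def Pre_GetStrWithFixedWidth (Input : List String) (MaxWidth : Int) (PaddingPos : Int) (Sep : String) : Prop := 0 < MaxWidth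
instance (Input : List String) (MaxWidth : Int) (PaddingPos : Int) (Sep : String) : Decidable (Pre_GetStrWithFixedWidth Input MaxWidth PaddingPos Sep) := by unfold Pre_GetStrWithFixedWidth; infer_instance

def pvWitness_GetStrWithFixedWidth : List String × Int × Int × String := (["ab", "cd", "e"], 5, 1, "\n")

def Spec_GetStrWithFixedWidth (Input : List String) (MaxWidth : Int) (PaddingPos : Int) (Sep : String) (out : String) : Prop := out = GetStrWithFixedWidth_alt Input MaxWidth PaddingPos Sep
instance (Input : List String) (MaxWidth : Int) (PaddingPos : Int) (Sep : String) (out : String) : Decidable (Spec_GetStrWithFixedWidth Input MaxWidth PaddingPos Sep out) := by unfold Spec_GetStrWithFixedWidth; infer_instance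

-- ===== CLAIM (what is proved, stated in full; the proofs are below) =====
def Claim_equal_GetStrWithFixedWidth : Prop := ∀ (Input : List String) (MaxWidth : Int) (PaddingPos : Int) (Sep : String), Dom_GetStrWithFixedWidth Input MaxWidth PaddingPos Sep → Pre_GetStrWithFixedWidth Input MaxWidth PaddingPos Sep → Spec_GetStrWithFixedWidth Input MaxWidth PaddingPos Sep (GetStrWithFixedWidth Input MaxWidth PaddingPos Sep)

-- ===== LEMMAS AND PROOFS =====

-- A's loop only ever appends to Result: the accumulator is a prefix of the final string.
theorem pvLoopA_prefix (MaxWidth PaddingPos : Int) (SepPad : List Char)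
    (rest : List String) (r : List Char) (pos : Int) :
    pvLoopA MaxWidth PaddingPos SepPad rest r pos
      = r ++ pvLoopA MaxWidth PaddingPos SepPad rest [] pos := by
  induction rest generalizing r pos with
  | nil => simp [pvLoopA]
  | cons S rest ih =>
      simp only [pvLoopA]
      by_cases h : pos + (S.toList.length : Int) > MaxWidth
      · simp only [h, ite_true]
        rw [ih]
        conv_rhs => rw [ih]
        simp [List.append_assoc]
      · simp only [h, ite_false]
        rw [ih]
        conv_rhs => rw [ih]
        simp [List.append_assoc]

theorem intercalate_cons_cons {α : Type} (J a b : List α) (L : List (List α)) :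
    J.intercalate (a :: b :: L) = a ++ J ++ J.intercalate (b :: L) := by
  simp [List.intercalate, List.intersperse, List.append_assoc]

-- appending a suffix to the LAST line of a join
theorem intercalate_last_append {α : Type} (J : List α) (L : List (List α)) (x y : List α) :
    J.intercalate (L ++ [x ++ y]) = J.intercalate (L ++ [x]) ++ y := by
  induction L with
  | nil => simp [List.intercalate]
  | cons a L ih =>
      cases L with
      | nil => simp [List.intercalate, List.append_assoc]
      | cons b L =>
          simp only [List.cons_append, intercalate_cons_cons]
          rw [List.cons_append] at ih
          rw [ih]; simp [List.append_assoc]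

-- starting a NEW last line in a join
theorem intercalate_append_singleton {α : Type} (J : List α) (L : List (List α)) (x : List α)
    (hL : L ≠ []) :
    J.intercalate (L ++ [x]) = J.intercalate L ++ J ++ x := by
  induction L with
  | nil => exact absurd rfl hL
  | cons a L ih =>
      cases L with
      | nil => simp [List.intercalate]
      | cons b L =>
          simp only [List.cons_append, intercalate_cons_cons]
          have e : b :: (L ++ [x]) = (b :: L) ++ [x] := rfl
          rw [e, ih (by simp)]
          simp [List.append_assoc]

-- rendering a line distributes over appending one more string to it
theorem renderLine_append (line : List (List Char)) (cs : List Char) :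
    pvRenderLine (line ++ [cs]) = pvRenderLine line ++ ' ' :: cs := by
  simp [pvRenderLine]

-- the loop invariant tying B's grouping to A's accumulation
theorem pvGroup_render (MaxWidth PaddingPos : Int) (J : List Char)
    (rest : List String) (lines : List (List (List Char))) (curr : List (List Char)) (pos : Int) :
    J.intercalate ((pvGroup MaxWidth PaddingPos rest lines curr pos).map pvRenderLine)
      = J.intercalate ((lines ++ [curr]).map pvRenderLine)
        ++ pvLoopA MaxWidth PaddingPos J rest [] pos := by
  induction rest generalizing lines curr pos with
  | nil => simp [pvGroup, pvLoopA]
  | cons S rest ih =>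
      simp only [pvGroup, pvLoopA]
      by_cases h : pos + (S.toList.length : Int) > MaxWidth
      · simp only [h, ite_true]
        rw [ih]
        have key : J.intercalate (((lines ++ [curr]) ++ [[] ++ [S.toList]]).map pvRenderLine)
            = J.intercalate ((lines ++ [curr]).map pvRenderLine) ++ J ++ (' ' :: S.toList) := by
          rw [List.map_append]
          simp only [List.map_cons, List.map_nil, List.nil_append]
          rw [intercalate_append_singleton _ _ _ (by simp)]
          simp [pvRenderLine]
        rw [key]
        conv_rhs => rw [pvLoopA_prefix]
        simp [List.append_assoc]
      · simp only [h, ite_false]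
        rw [ih]
        have key : J.intercalate ((lines ++ [curr ++ [S.toList]]).map pvRenderLine)
            = J.intercalate ((lines ++ [curr]).map pvRenderLine) ++ ' ' :: S.toList := by
          rw [List.map_append, List.map_append, List.map_singleton, List.map_singleton,
            renderLine_append, intercalate_last_append]
        rw [key]
        conv_rhs => rw [pvLoopA_prefix]
        simp [List.append_assoc]

theorem charsJoin_eq_intercalate (J : List Char) (L : List (List Char)) :
    PySem.Chars.join J L = J.intercalate L := by
  simp [PySem.Chars.join]

-- ===== VERDICT (by name: the statement is the Claim_ definition above) =====
theorem GetStrWithFixedWidth_spec : Claim_equal_GetStrWithFixedWidth := by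
  intro Input MaxWidth PaddingPos Sep _ _
  unfold Spec_GetStrWithFixedWidth GetStrWithFixedWidth GetStrWithFixedWidth_alt
  rw [charsJoin_eq_intercalate, pvGroup_render]
  simp [pvRenderLine, List.intercalate]
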